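-- pv_equiv track=rewrite | github.com/raeez/chiral-bar-cobar | compute/lib/bar_cohomology_y111_explicit_engine.py | vacuum_module_dims
-- ===== SOURCE A (Python) =====
-- from typing import Dict, List, Optional, Tuple
--
-- def vacuum_module_dims(max_weight: int) -> Dict[int, int]:
--     r"""Dimensions of the vacuum module at each weight.
--
--     Computed via generating function convolution (independent of
--     the explicit basis enumeration, for cross-validation).
--
--     GF = prod_{n>=1} 1/(1-q^n) * prod_{n>=2} 1/(1-q^n)
--     """
--     # J-sector: partitions into parts >= 1 (= all partitions)
--     j_dims = [0] * (max_weight + 1)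
--     j_dims[0] = 1
--     for n in range(1, max_weight + 1):
--         for k in range(n, max_weight + 1):
--             j_dims[k] += j_dims[k - n]
--
--     # T-sector: partitions into parts >= 2
--     t_dims = [0] * (max_weight + 1)
--     t_dims[0] = 1
--     for n in range(2, max_weight + 1):
--         for k in range(n, max_weight + 1):
--             t_dims[k] += t_dims[k - n]
--
--     # Convolution
--     total = [0] * (max_weight + 1)
--     for i in range(max_weight + 1):
--         for j in range(max_weight + 1 - i):
--             total[i + j] += j_dims[i] * t_dims[j]
--
--     return {h: total[h] for h in range(max_weight + 1)}
-- ===== SOURCE B (Python) =====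
-- def vacuum_module_dims(max_weight):
--     """Dimensions of the vacuum module at each weight.
--
--     Same generating function prod_{n>=1} 1/(1-q^n) * prod_{n>=2} 1/(1-q^n),
--     realised by folding every Euler factor into ONE coefficient array
--     (no separate j/t arrays and no explicit convolution pass).
--     """
--     dims = [0] * (max_weight + 1)
--     dims[0] = 1
--     # factor prod_{n>=1} 1/(1-q^n)
--     for n in range(1, max_weight + 1):
--         for k in range(n, max_weight + 1):
--             dims[k] += dims[k - n]
--     # factor prod_{n>=2} 1/(1-q^n)
--     for n in range(2, max_weight + 1):
--         for k in range(n, max_weight + 1):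
--             dims[k] += dims[k - n]
--     return {h: dims[h] for h in range(max_weight + 1)}
-- ===== Notes on version B (the rewrite author's own statement) =====
-- stated objective: faster
-- what changed: B drops A's two separate sector arrays and its explicit quadratic convolution pass: it folds every Euler factor (parts >= 1 once, parts >= 2 once more) into a single coefficient array and reads the answer off that array.
import Mathlib
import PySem

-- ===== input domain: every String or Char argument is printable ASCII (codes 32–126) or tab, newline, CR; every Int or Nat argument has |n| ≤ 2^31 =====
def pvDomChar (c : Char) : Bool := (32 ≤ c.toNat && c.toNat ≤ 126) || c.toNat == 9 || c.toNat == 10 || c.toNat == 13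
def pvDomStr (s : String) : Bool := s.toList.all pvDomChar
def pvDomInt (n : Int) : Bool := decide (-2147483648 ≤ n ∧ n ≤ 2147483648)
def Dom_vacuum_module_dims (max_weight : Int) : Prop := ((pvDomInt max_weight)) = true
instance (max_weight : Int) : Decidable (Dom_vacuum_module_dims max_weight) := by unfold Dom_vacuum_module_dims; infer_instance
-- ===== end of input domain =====

-- B folds every Euler factor into one coefficient array instead of A's two sector
-- arrays plus an explicit convolution pass (objective: faster by a constant factor,
-- measured; equal return values).

-- ===== PORT A =====
def vacuum_module_dims (max_weight : Int) : List (Int × Int) :=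
  -- j_dims = [0]*(max_weight+1); j_dims[0] = 1; two nested loops (parts >= 1)
  let j_dims :=
    (PySem.List.pyRange 1 (max_weight + 1) 1).foldl (fun a n =>
      (PySem.List.pyRange n (max_weight + 1) 1).foldl (fun a k =>
        PySem.List.pySetD a k (PySem.List.pyGetD a k 0 + PySem.List.pyGetD a (k - n) 0)) a)
      (PySem.List.pySetD (List.replicate (max_weight + 1).toNat (0 : Int)) 0 1)
  -- t_dims: same loops starting at 2 (parts >= 2)
  let t_dims :=
    (PySem.List.pyRange 2 (max_weight + 1) 1).foldl (fun a n =>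
      (PySem.List.pyRange n (max_weight + 1) 1).foldl (fun a k =>
        PySem.List.pySetD a k (PySem.List.pyGetD a k 0 + PySem.List.pyGetD a (k - n) 0)) a)
      (PySem.List.pySetD (List.replicate (max_weight + 1).toNat (0 : Int)) 0 1)
  -- convolution
  let total :=
    (PySem.List.pyRange 0 (max_weight + 1) 1).foldl (fun tot i =>
      (PySem.List.pyRange 0 (max_weight + 1 - i) 1).foldl (fun tot j =>
        PySem.List.pySetD tot (i + j)
          (PySem.List.pyGetD tot (i + j) 0 +
            PySem.List.pyGetD j_dims i 0 * PySem.List.pyGetD t_dims j 0)) tot)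
      (List.replicate (max_weight + 1).toNat (0 : Int))
  (PySem.List.pyRange 0 (max_weight + 1) 1).map (fun h => (h, PySem.List.pyGetD total h 0))

-- ===== PORT B =====
def vacuum_module_dims_alt (max_weight : Int) : List (Int × Int) :=
  -- dims = [0]*(max_weight+1); dims[0] = 1
  let dims0 := PySem.List.pySetD (List.replicate (max_weight + 1).toNat (0 : Int)) 0 1
  -- fold in the factor prod_{n>=1} 1/(1-q^n)
  let dims1 :=
    (PySem.List.pyRange 1 (max_weight + 1) 1).foldl (fun d n =>
      (PySem.List.pyRange n (max_weight + 1) 1).foldl (fun d k =>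
        PySem.List.pySetD d k (PySem.List.pyGetD d k 0 + PySem.List.pyGetD d (k - n) 0)) d)
      dims0
  -- fold in the factor prod_{n>=2} 1/(1-q^n)
  let dims2 :=
    (PySem.List.pyRange 2 (max_weight + 1) 1).foldl (fun d n =>
      (PySem.List.pyRange n (max_weight + 1) 1).foldl (fun d k =>
        PySem.List.pySetD d k (PySem.List.pyGetD d k 0 + PySem.List.pyGetD d (k - n) 0)) d)
      dims1
  (PySem.List.pyRange 0 (max_weight + 1) 1).map (fun h => (h, PySem.List.pyGetD dims2 h 0))

-- ===== PRECONDITION & SPEC =====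
-- Pre_ excludes exactly the negative max_weight inputs, where Python A raises IndexError
-- assigning the constant term of an empty list (B raises the same way there).
def Pre_vacuum_module_dims (max_weight : Int) : Prop := 0 ≤ max_weight
instance (max_weight : Int) : Decidable (Pre_vacuum_module_dims max_weight) := by
  unfold Pre_vacuum_module_dims; infer_instance

def pvWitness_vacuum_module_dims : Int := 6

def Spec_vacuum_module_dims (max_weight : Int) (out : List (Int × Int)) : Prop :=
  out = vacuum_module_dims_alt max_weight
instance (max_weight : Int) (out : List (Int × Int)) : Decidable (Spec_vacuum_module_dims max_weight out) := by
  unfold Spec_vacuum_module_dims; infer_instance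

-- ===== CLAIM (what is proved, stated in full; the proofs are below) =====
def Claim_equal_vacuum_module_dims : Prop := ∀ (max_weight : Int), Dom_vacuum_module_dims max_weight → Pre_vacuum_module_dims max_weight → Spec_vacuum_module_dims max_weight (vacuum_module_dims max_weight)

-- ===== LEMMAS AND PROOFS =====

-- coefficient view of an array
def pvCf (a : List Int) : ℕ → ℤ := fun i => a.getD i 0
-- effect of the inner loop 'for k in range(n, L): a[k] += a[k-n]' on coefficients
def pvF (n : ℕ) (f : ℕ → ℤ) : ℕ → ℤ := fun i => ∑ j ∈ Finset.range (i / n + 1), f (i - j * n)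
def pvE0 : ℕ → ℤ := fun i => if i = 0 then 1 else 0
def pvFold (ns : List ℕ) (f : ℕ → ℤ) : ℕ → ℤ := ns.foldl (fun g n => pvF n g) f
-- the Euler factor 1/(1-q^n) as a power series
def pvG (n : ℕ) : PowerSeries ℤ := PowerSeries.mk fun i => if n ∣ i then 1 else 0
-- nat-level loops
def pvInner (n : ℕ) (a : List Int) (ks : List ℕ) : List Int :=
  ks.foldl (fun s k => s.set k (s.getD k 0 + s.getD (k - n) 0)) a
def pvSector (L : ℕ) (a : List Int) (ns : List ℕ) : List Int :=
  ns.foldl (fun s n => pvInner n s (List.range' n (L - n))) a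
def pvAddRow (i : ℕ) (v : ℕ → ℤ) (tot : List Int) (js : List ℕ) : List Int :=
  js.foldl (fun s j => s.set (i + j) (s.getD (i + j) 0 + v j)) tot
def pvConvLoop (L : ℕ) (v2 : ℕ → ℕ → ℤ) (tot : List Int) (is' : List ℕ) : List Int :=
  is'.foldl (fun s i => pvAddRow i (v2 i) s (List.range' 0 (L - i))) tot

theorem pvF_lt {n : ℕ} (f : ℕ → ℤ) {i : ℕ} (h : i < n) : pvF n f i = f i := by
  unfold pvF
  rw [Nat.div_eq_of_lt h]
  simp

theorem pvF_peel {n k : ℕ} (f : ℕ → ℤ) (hn : 1 ≤ n) (hk : n ≤ k) :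
    pvF n f k = f k + pvF n f (k - n) := by
  unfold pvF
  rw [Nat.div_eq_sub_div hn hk, Finset.sum_range_succ']
  have : ∀ j : ℕ, k - (j + 1) * n = (k - n) - j * n := by
    intro j
    have : (j + 1) * n = n + j * n := by ring
    rw [this, ← Nat.sub_sub]
  simp only [this, Nat.sub_zero, Nat.zero_mul]
  ring

theorem pvF_congr {n i : ℕ} {f g : ℕ → ℤ} (h : ∀ j ≤ i, f j = g j) : pvF n f i = pvF n g i := by
  unfold pvF
  refine Finset.sum_congr rfl fun j _ => ?_
  exact h _ (Nat.sub_le _ _)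

theorem pvF_mk {n : ℕ} (f : ℕ → ℤ) (hn : 1 ≤ n) :
    PowerSeries.mk (pvF n f) = PowerSeries.mk f * pvG n := by
  have hn' : 0 < n := hn
  refine PowerSeries.ext fun i => ?_
  rw [PowerSeries.coeff_mk, PowerSeries.coeff_mul,
    Finset.Nat.sum_antidiagonal_eq_sum_range_succ_mk]
  simp only [PowerSeries.coeff_mk, pvG, mul_ite, mul_one, mul_zero]
  rw [← Finset.sum_filter]
  unfold pvF
  refine Finset.sum_nbij' (i := fun j => i - j * n) (j := fun k => (i - k) / n)
    ?_ ?_ ?_ ?_ ?_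
  · intro j hj
    rw [Finset.mem_range, Nat.lt_succ_iff, Nat.le_div_iff_mul_le hn'] at hj
    rw [Finset.mem_filter, Finset.mem_range, Nat.lt_succ_iff]
    refine ⟨Nat.sub_le _ _, ?_⟩
    rw [Nat.sub_sub_self hj]
    exact dvd_mul_left n j
  · intro k hk
    rw [Finset.mem_filter, Finset.mem_range, Nat.lt_succ_iff] at hk
    rw [Finset.mem_range, Nat.lt_succ_iff]
    exact Nat.div_le_div_right (Nat.sub_le _ _)
  · intro j hj
    rw [Finset.mem_range, Nat.lt_succ_iff, Nat.le_div_iff_mul_le hn'] at hj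
    show (i - (i - j * n)) / n = j
    rw [Nat.sub_sub_self hj, Nat.mul_div_cancel _ hn']
  · intro k hk
    rw [Finset.mem_filter, Finset.mem_range, Nat.lt_succ_iff] at hk
    show i - (i - k) / n * n = k
    rw [Nat.div_mul_cancel hk.2, Nat.sub_sub_self hk.1]
  · intro j _
    rfl


theorem pvFold_mk {ns : List ℕ} (f : ℕ → ℤ) (h : ∀ n ∈ ns, 1 ≤ n) :
    PowerSeries.mk (pvFold ns f) = PowerSeries.mk f * (ns.map pvG).prod := by
  induction ns generalizing f with
  | nil => simp [pvFold]
  | cons n ns ih =>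
    have h1 : 1 ≤ n := h n (List.mem_cons_self ..)
    have hrec : pvFold (n :: ns) f = pvFold ns (pvF n f) := rfl
    rw [hrec, ih _ (fun m hm => h m (List.mem_cons_of_mem _ hm)), pvF_mk f h1]
    simp [List.prod_cons, mul_assoc]

theorem pvE0_mk : PowerSeries.mk pvE0 = 1 := by
  refine PowerSeries.ext fun i => ?_
  simp [pvE0, PowerSeries.coeff_one, PowerSeries.coeff_mk]

theorem pvConv_coeff (f g : ℕ → ℤ) (h : ℕ) :
    ∑ i ∈ Finset.range (h + 1), f i * g (h - i) =
      PowerSeries.coeff h (PowerSeries.mk f * PowerSeries.mk g) := by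
  rw [PowerSeries.coeff_mul, Finset.Nat.sum_antidiagonal_eq_sum_range_succ_mk]
  simp [PowerSeries.coeff_mk]

-- the algebraic heart: convolving the two folded sectors = folding all factors into one array
theorem pvModel_main {L1 L2 : List ℕ} (h1 : ∀ n ∈ L1, 1 ≤ n) (h2 : ∀ n ∈ L2, 1 ≤ n) (h : ℕ) :
    ∑ i ∈ Finset.range (h + 1), pvFold L1 pvE0 i * pvFold L2 pvE0 (h - i) =
      pvFold L2 (pvFold L1 pvE0) h := by
  rw [pvConv_coeff]
  have e1 := pvFold_mk (ns := L1) pvE0 h1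
  have e2 := pvFold_mk (ns := L2) pvE0 h2
  have e3 := pvFold_mk (ns := L2) (pvFold L1 pvE0) h2
  have e4 : pvFold L2 (pvFold L1 pvE0) h =
      PowerSeries.coeff h (PowerSeries.mk (pvFold L2 (pvFold L1 pvE0))) :=
    (PowerSeries.coeff_mk ..).symm
  rw [e4, e3, e1, e2, pvE0_mk]
  congr 1
  ring

theorem pvCf_set (l : List Int) (p : ℕ) (v : ℤ) (hp : p < l.length) (i : ℕ) :
    pvCf (l.set p v) i = if i = p then v else pvCf l i := by
  simp only [pvCf, List.getD_eq_getElem?_getD, List.getElem?_set]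
  rcases eq_or_ne i p with h | h
  · subst h
    simp [hp]
  · simp [h, Ne.symm h]

theorem pvInner_spec {n L : ℕ} (hn : 1 ≤ n) {a : List Int} (ha : a.length = L)
    (t : ℕ) (ht : n + t ≤ L) :
    (pvInner n a (List.range' n t)).length = L ∧
      ∀ i < L, pvCf (pvInner n a (List.range' n t)) i =
        if i < n + t then pvF n (pvCf a) i else pvCf a i := by
  induction t with
  | zero =>
    rw [List.range'_zero]
    refine ⟨ha, fun i hi => ?_⟩
    show pvCf a i = _
    split
    · exact (pvF_lt _ (by omega)).symm
    · rfl
  | succ t ih =>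
    obtain ⟨hlen, hcf⟩ := ih (by omega)
    have hconcat : List.range' n (t + 1) = List.range' n t ++ [n + t] := by
      simpa using List.range'_concat (s := n) (n := t) (step := 1)
    set st := pvInner n a (List.range' n t) with hst
    have hstep : pvInner n a (List.range' n (t + 1)) =
        st.set (n + t) (st.getD (n + t) 0 + st.getD (n + t - n) 0) := by
      rw [pvInner, hconcat, List.foldl_append]
      rfl
    have hv1 : st.getD (n + t) 0 = pvCf a (n + t) := by
      have := hcf (n + t) (by omega)
      simpa [pvCf] using this
    have hv2 : st.getD (n + t - n) 0 = pvF n (pvCf a) t := by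
      have := hcf t (by omega)
      have ht' : t < n + t := by omega
      simp only [Nat.add_sub_cancel_left]
      simpa [pvCf, ht'] using this
    have hval : st.getD (n + t) 0 + st.getD (n + t - n) 0 = pvF n (pvCf a) (n + t) := by
      have hp := pvF_peel (pvCf a) hn (show n ≤ n + t by omega)
      rw [Nat.add_sub_cancel_left] at hp
      rw [hv1, hv2, hp]
    refine ⟨by rw [hstep]; simp [hlen], fun i hi => ?_⟩
    rw [hstep, pvCf_set _ _ _ (by omega)]
    by_cases hip : i = n + t
    · subst hip
      rw [if_pos rfl, if_pos (show n + t < n + (t + 1) by omega)]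
      exact hval
    · rw [if_neg hip, hcf i hi]
      by_cases hlt : i < n + t
      · rw [if_pos hlt, if_pos (by omega)]
      · rw [if_neg hlt, if_neg (by omega)]

theorem pvSector_spec {L : ℕ} (ns : List ℕ) (hns : ∀ n ∈ ns, 1 ≤ n)
    {a : List Int} (ha : a.length = L) (g : ℕ → ℤ) (hg : ∀ i < L, pvCf a i = g i) :
    (pvSector L a ns).length = L ∧ ∀ i < L, pvCf (pvSector L a ns) i = pvFold ns g i := by
  induction ns generalizing a g with
  | nil => exact ⟨ha, fun i hi => hg i hi⟩
  | cons n ns ih =>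
    have hn : 1 ≤ n := hns n (List.mem_cons_self ..)
    have hstep : pvSector L a (n :: ns) =
        pvSector L (pvInner n a (List.range' n (L - n))) ns := rfl
    have hfold : pvFold (n :: ns) g = pvFold ns (pvF n g) := rfl
    by_cases hnL : n ≤ L
    · obtain ⟨hlen, hcf⟩ := pvInner_spec hn ha (L - n) (by omega)
      have hg' : ∀ i < L, pvCf (pvInner n a (List.range' n (L - n))) i = pvF n g i := by
        intro i hi
        have hlt : i < n + (L - n) := by omega
        rw [hcf i hi, if_pos hlt]
        exact pvF_congr fun j hj => hg j (by omega)
      rw [hstep, hfold]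
      exact ih (fun m hm => hns m (List.mem_cons_of_mem _ hm)) hlen _ hg'
    · have hz : L - n = 0 := by omega
      have hnil : pvInner n a (List.range' n (L - n)) = a := by
        rw [hz, List.range'_zero]
        rfl
      have hg' : ∀ i < L, pvCf a i = pvF n g i := by
        intro i hi
        rw [pvF_lt _ (by omega)]
        exact hg i hi
      rw [hstep, hfold, hnil]
      exact ih (fun m hm => hns m (List.mem_cons_of_mem _ hm)) ha _ hg'

theorem pvAddRow_spec {L : ℕ} (i : ℕ) (v : ℕ → ℤ) {tot : List Int} (hl : tot.length = L)
    (t : ℕ) (ht : i + t ≤ L) :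
    (pvAddRow i v tot (List.range' 0 t)).length = L ∧
      ∀ h < L, pvCf (pvAddRow i v tot (List.range' 0 t)) h =
        pvCf tot h + (if i ≤ h ∧ h < i + t then v (h - i) else 0) := by
  induction t with
  | zero =>
    rw [List.range'_zero]
    refine ⟨hl, fun h hh => ?_⟩
    show pvCf tot h = _
    have hfalse : ¬ (i ≤ h ∧ h < i + 0) := by omega
    rw [if_neg hfalse, add_zero]
  | succ t ih =>
    obtain ⟨hlen, hcf⟩ := ih (by omega)
    have hconcat : List.range' 0 (t + 1) = List.range' 0 t ++ [t] := by
      simpa using List.range'_concat (s := 0) (n := t) (step := 1)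
    set st := pvAddRow i v tot (List.range' 0 t) with hst
    have hstep : pvAddRow i v tot (List.range' 0 (t + 1)) =
        st.set (i + t) (st.getD (i + t) 0 + v t) := by
      rw [pvAddRow, hconcat, List.foldl_append]
      rfl
    refine ⟨by rw [hstep]; simp [hlen], fun h hh => ?_⟩
    rw [hstep, pvCf_set _ _ _ (by omega)]
    by_cases hip : h = i + t
    · subst hip
      have := hcf (i + t) hh
      have hnot : ¬ (i ≤ i + t ∧ i + t < i + t) := by omega
      rw [if_pos rfl]
      show st.getD (i + t) 0 + v t = _
      have hgd : st.getD (i + t) 0 = pvCf st (i + t) := rfl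
      rw [hgd, this, if_neg hnot, if_pos (by omega), Nat.add_sub_cancel_left]
      ring
    · rw [if_neg hip, hcf h hh]
      by_cases hlt : i ≤ h ∧ h < i + t
      · rw [if_pos hlt, if_pos (by omega)]
      · rw [if_neg hlt, if_neg (by omega)]

theorem pvConvLoop_spec {L : ℕ} (v2 : ℕ → ℕ → ℤ) {tot : List Int} (hl : tot.length = L)
    (s : ℕ) (hs : s ≤ L) :
    (pvConvLoop L v2 tot (List.range' 0 s)).length = L ∧
      ∀ h < L, pvCf (pvConvLoop L v2 tot (List.range' 0 s)) h =
        pvCf tot h + ∑ i ∈ Finset.range s, (if i ≤ h then v2 i (h - i) else 0) := by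
  induction s with
  | zero =>
    rw [List.range'_zero]
    refine ⟨hl, fun h hh => ?_⟩
    show pvCf tot h = _
    simp
  | succ s ih =>
    obtain ⟨hlen, hcf⟩ := ih (by omega)
    have hconcat : List.range' 0 (s + 1) = List.range' 0 s ++ [s] := by
      simpa using List.range'_concat (s := 0) (n := s) (step := 1)
    have hstep : pvConvLoop L v2 tot (List.range' 0 (s + 1)) =
        pvAddRow s (v2 s) (pvConvLoop L v2 tot (List.range' 0 s)) (List.range' 0 (L - s)) := by
      rw [pvConvLoop, hconcat, List.foldl_append]
      rfl
    obtain ⟨hlen2, hcf2⟩ := pvAddRow_spec s (v2 s) hlen (L - s) (by omega)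
    refine ⟨by rw [hstep]; exact hlen2, fun h hh => ?_⟩
    rw [hstep, hcf2 h hh, hcf h hh, Finset.sum_range_succ, add_assoc]
    congr 1
    by_cases hlt : s ≤ h
    · rw [if_pos (show s ≤ h ∧ h < s + (L - s) by omega), if_pos hlt]
    · rw [if_neg (by omega), if_neg hlt]

-- bridge: a Python foldl over range(lo, L) = a nat foldl over List.range' lo (L-lo)
theorem pvBridge {α : Type} (a : α) (g : α → ℕ → α) (gI : α → Int → α) (loI LI : Int)
    (lo L : ℕ) (hlo : loI = (lo : ℕ)) (hLI : LI = (L : ℕ))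
    (h : ∀ s (k : ℕ), lo ≤ k → k < L → gI s (k : Int) = g s k) :
    (PySem.List.pyRange loI LI 1).foldl gI a = (List.range' lo (L - lo)).foldl g a := by
  subst hlo hLI
  have h1 : PySem.List.pyRange (lo : Int) (L : Int) 1 =
      (List.range' lo (L - lo)).map (fun k : ℕ => (k : Int)) := by
    rw [PySem.List.pyRange_one, List.range'_eq_map_range, List.map_map]
    have h2 : ((L : Int) - lo).toNat = L - lo := by omega
    rw [h2]
    refine List.map_congr_left fun k _ => ?_
    simp only [Function.comp_apply]
    push_cast
    ring
  rw [h1, List.foldl_map]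
  apply PySem.List.foldl_congr_mem
  intro acc x hx
  rw [List.mem_range'_1] at hx
  exact h acc x hx.1 (by omega)

theorem pvCf_replicate0 (L i : ℕ) : pvCf (List.replicate L (0 : Int)) i = 0 := by
  unfold pvCf
  rcases Nat.lt_or_ge i L with hi | hi
  · simp [List.getD_eq_getElem?_getD, hi]
  · rw [List.getD_eq_default _ _ (by simpa using hi)]

-- the sector double loop of the ports, as pvSector
theorem pvSectorPy (m : ℕ) (loI : Int) (lo : ℕ) (hlo : loI = (lo : ℕ)) (init : List Int) :
    (PySem.List.pyRange loI ((m : Int) + 1) 1).foldl (fun a n =>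
      (PySem.List.pyRange n ((m : Int) + 1) 1).foldl (fun a k =>
        PySem.List.pySetD a k (PySem.List.pyGetD a k 0 + PySem.List.pyGetD a (k - n) 0)) a) init =
    pvSector (m + 1) init (List.range' lo (m + 1 - lo)) := by
  rw [pvBridge init (fun s n => pvInner n s (List.range' n (m + 1 - n))) _ loI ((m : Int) + 1)
    lo (m + 1) hlo (by push_cast; ring) ?_]
  · rfl
  intro s k hk1 hk2
  rw [pvBridge s (fun s' k' => s'.set k' (s'.getD k' 0 + s'.getD (k' - k) 0)) _
    ((k : ℕ) : Int) ((m : Int) + 1) k (m + 1) rfl (by push_cast; ring) ?_]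
  · rfl
  intro s' k' hk1' hk2'
  have hsub : ((k' : ℕ) : Int) - ((k : ℕ) : Int) = ((k' - k : ℕ) : Int) := by omega
  rw [hsub]
  simp [PySem.List.pySetD_natCast, PySem.List.pyGetD_natCast]

-- the convolution double loop of port A, as pvConvLoop
theorem pvConvPy (m : ℕ) (J T tot : List Int) :
    (PySem.List.pyRange 0 ((m : Int) + 1) 1).foldl (fun tot i =>
      (PySem.List.pyRange 0 ((m : Int) + 1 - i) 1).foldl (fun tot j =>
        PySem.List.pySetD tot (i + j)
          (PySem.List.pyGetD tot (i + j) 0 +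
            PySem.List.pyGetD J i 0 * PySem.List.pyGetD T j 0)) tot) tot =
    pvConvLoop (m + 1) (fun i j => pvCf J i * pvCf T j) tot (List.range' 0 (m + 1)) := by
  rw [pvBridge tot
    (fun s i => pvAddRow i (fun j => pvCf J i * pvCf T j) s (List.range' 0 (m + 1 - i)))
    _ 0 ((m : Int) + 1) 0 (m + 1) (by norm_num) (by push_cast; ring) ?_]
  · rw [Nat.sub_zero]
    rfl
  intro s i hi1 hi2
  rw [pvBridge s
    (fun s' j => s'.set (i + j) (s'.getD (i + j) 0 + pvCf J i * pvCf T j))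
    _ 0 ((m : Int) + 1 - ((i : ℕ) : Int)) 0 (m + 1 - i) (by norm_num) (by omega) ?_]
  · rw [Nat.sub_zero]
    rfl
  intro s' j hj1 hj2
  have hadd : ((i : ℕ) : Int) + ((j : ℕ) : Int) = ((i + j : ℕ) : Int) := by omega
  simp only [hadd, PySem.List.pySetD_natCast, PySem.List.pyGetD_natCast, pvCf]

theorem pvInit_cf {L : ℕ} (hL : 1 ≤ L) (i : ℕ) :
    pvCf ((List.replicate L (0 : Int)).set 0 1) i = pvE0 i := by
  have hrep : (List.replicate L (0 : Int)).getD i 0 = 0 := by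
    rcases Nat.lt_or_ge i L with hi | hi
    · simp [List.getD_eq_getElem?_getD, hi]
    · rw [List.getD_eq_default _ _ (by simpa using hi)]
  rw [pvCf_set _ _ _ (by simpa using hL)]
  unfold pvE0
  rcases eq_or_ne i 0 with h | h
  · simp [h]
  · rw [if_neg h, if_neg h]
    exact hrep

-- A's convolution of the two folded sectors equals B's twice-folded single array
theorem pvKey (m h : ℕ) (hh : h < m + 1) :
    pvCf (pvConvLoop (m + 1)
      (fun i j => pvCf (pvSector (m + 1) ((List.replicate (m + 1) (0 : Int)).set 0 1) (List.range' 1 (m + 1 - 1))) i *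
                  pvCf (pvSector (m + 1) ((List.replicate (m + 1) (0 : Int)).set 0 1) (List.range' 2 (m + 1 - 2))) j)
      (List.replicate (m + 1) (0 : Int)) (List.range' 0 (m + 1))) h =
    pvCf (pvSector (m + 1) (pvSector (m + 1) ((List.replicate (m + 1) (0 : Int)).set 0 1) (List.range' 1 (m + 1 - 1))) (List.range' 2 (m + 1 - 2))) h := by
  have hL : 1 ≤ m + 1 := by omega
  have hinitlen : ((List.replicate (m + 1) (0 : Int)).set 0 1).length = m + 1 := by simp
  have hinitcf : ∀ i < m + 1, pvCf ((List.replicate (m + 1) (0 : Int)).set 0 1) i = pvE0 i :=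
    fun i _ => pvInit_cf hL i
  have hns1 : ∀ n ∈ List.range' 1 (m + 1 - 1), 1 ≤ n := by
    intro n hn
    rw [List.mem_range'_1] at hn
    omega
  have hns2 : ∀ n ∈ List.range' 2 (m + 1 - 2), 1 ≤ n := by
    intro n hn
    rw [List.mem_range'_1] at hn
    omega
  obtain ⟨hjlen, hjcf⟩ := pvSector_spec (List.range' 1 (m + 1 - 1)) hns1 hinitlen pvE0 hinitcf
  obtain ⟨htlen, htcf⟩ := pvSector_spec (List.range' 2 (m + 1 - 2)) hns2 hinitlen pvE0 hinitcf
  obtain ⟨hdlen, hdcf⟩ := pvSector_spec (List.range' 2 (m + 1 - 2)) hns2 hjlen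
    (pvFold (List.range' 1 (m + 1 - 1)) pvE0) hjcf
  obtain ⟨_, hconv⟩ := pvConvLoop_spec
    (fun i j => pvCf (pvSector (m + 1) ((List.replicate (m + 1) (0 : Int)).set 0 1) (List.range' 1 (m + 1 - 1))) i *
                pvCf (pvSector (m + 1) ((List.replicate (m + 1) (0 : Int)).set 0 1) (List.range' 2 (m + 1 - 2))) j)
    (show (List.replicate (m + 1) (0 : Int)).length = m + 1 by simp) (m + 1) le_rfl
  rw [hconv h hh, hdcf h hh, pvCf_replicate0, zero_add]
  have hsum : (∑ i ∈ Finset.range (m + 1),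
      (if i ≤ h then pvCf (pvSector (m + 1) ((List.replicate (m + 1) (0 : Int)).set 0 1) (List.range' 1 (m + 1 - 1))) i *
                     pvCf (pvSector (m + 1) ((List.replicate (m + 1) (0 : Int)).set 0 1) (List.range' 2 (m + 1 - 2))) (h - i) else 0)) =
      ∑ i ∈ Finset.range (h + 1),
        pvFold (List.range' 1 (m + 1 - 1)) pvE0 i * pvFold (List.range' 2 (m + 1 - 2)) pvE0 (h - i) := by
    have hsub : Finset.range (h + 1) ⊆ Finset.range (m + 1) := by
      intro x hx
      rw [Finset.mem_range] at *
      omega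
    rw [← Finset.sum_subset hsub
        (fun x hx hnx => if_neg (by rw [Finset.mem_range] at hnx; omega))]
    refine Finset.sum_congr rfl fun i hi => ?_
    rw [Finset.mem_range] at hi
    rw [if_pos (by omega), hjcf i (by omega), htcf (h - i) (by omega)]
  rw [hsum, pvModel_main hns1 hns2 h]

-- ===== VERDICT (by name: the statement is the Claim_ definition above) =====
theorem vacuum_module_dims_spec : Claim_equal_vacuum_module_dims := by
  intro mw _ hpre
  unfold Spec_vacuum_module_dims
  have h0 : 0 ≤ mw := hpre
  lift mw to ℕ using h0 with m
  simp only [vacuum_module_dims, vacuum_module_dims_alt]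
  have htn : ((m : Int) + 1).toNat = m + 1 := by omega
  rw [htn]
  have hset : PySem.List.pySetD (List.replicate (m + 1) (0 : Int)) 0 1 =
      (List.replicate (m + 1) (0 : Int)).set 0 1 := by
    rw [PySem.List.pySetD_of_nonneg _ _ le_rfl]
    rfl
  rw [hset]
  rw [pvSectorPy m 1 1 (by norm_num)]
  rw [pvSectorPy m 2 2 (by norm_num) ((List.replicate (m + 1) (0 : Int)).set 0 1)]
  rw [pvSectorPy m 2 2 (by norm_num)
    (pvSector (m + 1) ((List.replicate (m + 1) (0 : Int)).set 0 1) (List.range' 1 (m + 1 - 1)))]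
  rw [pvConvPy m]
  refine List.map_congr_left fun h hh => ?_
  rw [PySem.List.mem_pyRange_one] at hh
  have hcast : h = ((h.toNat : ℕ) : Int) := by omega
  rw [hcast, PySem.List.pyGetD_natCast, PySem.List.pyGetD_natCast]
  exact congrArg (fun z => (((h.toNat : ℕ) : Int), z)) (pvKey m h.toNat (by omega))
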